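-- pv_equiv track=rewrite | github.com/Handonggon/coding_test | programmers/2level/잉규식 알고리즘/[3차] n진수 게임.py | solution
-- ===== SOURCE A (Python) =====
-- def radix_Transformation(num, n) :
--     dic_R = {10 : "A",11 : "B",12 : "C",13 : "D",14 : "E", 15 : "F"}
--     temp = []
--     while num >= n :
--         if num % n in dic_R.keys() :
--             temp.append(dic_R[num % n])
--         else :
--             temp.append(str(num % n))
--         num //= n
--     if num in dic_R.keys() :
--         temp.append(dic_R[num])
--     else :
--         temp.append(str(num))
--
--     return ''.join(temp[::-1])
--
-- def solution(n, t, m, p):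
--     order = ""
--     for i in range(t*m) :
--         order += radix_Transformation(i,n)
--     result = ""
--     for i in range(len(order)) :
--         if i%m + 1 == p :
--             result += order[i]
--
--     return result[:t]
-- ===== SOURCE B (Python) =====
-- def _render(d):
--     return "ABCDEF"[d - 10] if 10 <= d <= 15 else str(d)
--
-- def _rec(num, n):
--     if num < n:
--         return _render(num)
--     return _rec(num // n, n) + _render(num % n)
--
-- def solution(n, t, m, p):
--     res = []
--     pos = 0
--     for i in range(t * m):
--         if len(res) == t:
--             break
--         for c in _rec(i, n):
--             if pos % m == p - 1:
--                 res.append(c)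
--             pos += 1
--     return "".join(res[:t])
-- ===== Notes on version B (the rewrite author's own statement) =====
-- stated objective: alternative
-- what changed: B never materialises the concatenated game string: it streams the digits of each number (emitted most-significant-first by a recursive base conversion instead of A's remainder list built, reversed and joined) past a single position counter, collecting player p's characters in one fused pass with an early break once t characters are collected, where A builds the full string by repeated '+=', rescans every character with a modulo filter and truncates at the end.
import Mathlib
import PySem

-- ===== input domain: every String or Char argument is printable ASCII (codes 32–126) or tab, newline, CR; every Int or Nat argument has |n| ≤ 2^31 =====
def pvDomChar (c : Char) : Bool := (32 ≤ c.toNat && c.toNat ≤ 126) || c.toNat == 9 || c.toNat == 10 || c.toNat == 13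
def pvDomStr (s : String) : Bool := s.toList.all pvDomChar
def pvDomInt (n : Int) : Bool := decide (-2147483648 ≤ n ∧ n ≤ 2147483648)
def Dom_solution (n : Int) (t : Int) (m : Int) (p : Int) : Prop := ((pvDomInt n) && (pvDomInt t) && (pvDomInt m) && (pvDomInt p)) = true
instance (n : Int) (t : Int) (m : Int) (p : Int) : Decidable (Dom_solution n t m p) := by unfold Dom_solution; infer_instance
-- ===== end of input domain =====

-- B: no concatenated game string — each number's digits are produced most-significant-first by a
-- recursive base conversion and streamed past one position counter that collects player p's characters
-- in a single fused pass, breaking out as soon as t characters are found (A builds the whole string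
-- with '+=', rescans it with a modulo filter and truncates).


-- ===== PORT A =====
-- dic_R = {10:"A", …, 15:"F"}
def pvDicR : PySem.Dict Int (List Char) :=
  ⟨[(10, ['A']), (11, ['B']), (12, ['C']), (13, ['D']), (14, ['E']), (15, ['F'])]⟩

-- 'dic_R[d] if d in dic_R.keys() else str(d)' (the branch shape shared by A's loop body and its final step)
def pvDigitA (d : Int) : List Char :=
  match PySem.Dict.get? pvDicR d with
  | some s => s
  | none => PySem.Int.toChars d

-- 'while num >= n: temp.append(…); num //= n' — fuel-totalised (fuel num.toNat+1 suffices whenever n ≥ 2)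
def pvRadixLoopA (n : Int) : Nat → Int → List (List Char) → (List (List Char) × Int)
  | 0, num, temp => (temp, num)
  | fuel + 1, num, temp =>
      if n ≤ num then
        pvRadixLoopA n fuel (PySem.Int.floordiv num n) (temp ++ [pvDigitA (PySem.Int.mod num n)])
      else (temp, num)

-- radix_Transformation(num, n); ''.join(temp[::-1]) is the flatten of the reversed list of char-lists
def pvRadixA (num n : Int) : List Char :=
  let r := pvRadixLoopA n (num.toNat + 1) num []
  ((r.1 ++ [pvDigitA r.2]).reverse).flatten

def solution (n : Int) (t : Int) (m : Int) (p : Int) : String :=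
  let order := (PySem.List.pyRange 0 (t * m)).foldl (fun acc i => acc ++ pvRadixA i n) ([] : List Char)
  -- 'for i in range(len(order)): if i % m + 1 == p: result += order[i]'
  -- (i is always in range, so order[i] is PySem.List.pyGetD; i % m only runs when order ≠ [], i.e. m ≠ 0)
  let result := (PySem.List.pyRange 0 (order.length : Int)).foldl
      (fun acc i => if PySem.Int.mod i m + 1 = p then acc ++ [PySem.List.pyGetD order i ' '] else acc)
      ([] : List Char)
  String.ofList (PySem.List.slice result none (some t))   -- result[:t]

-- ===== PORT B =====
-- '"ABCDEF"[d-10] if 10 <= d <= 15 else str(d)'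
def pvRender (d : Int) : List Char :=
  if 10 ≤ d ∧ d ≤ 15 then [PySem.List.pyGetD ['A', 'B', 'C', 'D', 'E', 'F'] (d - 10) ' ']
  else PySem.Int.toChars d

-- _rec(num, n): most-significant digit first, by recursion on num//n — fuel-totalised
-- (fuel num.toNat+1 suffices whenever 2 ≤ n)
def pvRec (n : Int) : Nat → Int → List Char
  | 0, _ => []
  | fuel + 1, num =>
      if num < n then pvRender num
      else pvRec n fuel (PySem.Int.floordiv num n) ++ pvRender (PySem.Int.mod num n)

-- 'for c in _rec(i, n): if pos % m == p - 1: res.append(c); pos += 1'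
def pvInner (m p : Int) (cs : List Char) (res : List Char) (pos : Int) : List Char × Int :=
  cs.foldl (fun st c => (if PySem.Int.mod st.2 m = p - 1 then st.1 ++ [c] else st.1, st.2 + 1)) (res, pos)

-- 'for i in range(t*m): if len(res) == t: break; <inner loop>'
def pvLoopB (n t m p : Int) : List Int → List Char → Int → List Char
  | [], res, _ => res
  | i :: rest, res, pos =>
      if (res.length : Int) = t then res
      else
        let st := pvInner m p (pvRec n (i.toNat + 1) i) res pos
        pvLoopB n t m p rest st.1 st.2

def solution_alt (n : Int) (t : Int) (m : Int) (p : Int) : String :=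
  let res := pvLoopB n t m p (PySem.List.pyRange 0 (t * m)) [] 0
  String.ofList (PySem.List.slice res none (some t))   -- ''.join(res[:t])

-- ===== PRECONDITION & SPEC =====
-- Pre_ excludes exactly the inputs on which A never returns: with at least one conversion (t*m ≥ 1),
-- n = 0 raises ZeroDivisionError at i = 0, n ≤ -1 loops forever at i = 0, and n = 1 loops forever as
-- soon as i = 1 is reached (t*m ≥ 2); A returns on everything Pre_ admits.
def Pre_solution (n : Int) (t : Int) (m : Int) (p : Int) : Prop :=
  2 ≤ n ∨ t * m ≤ 0 ∨ (n = 1 ∧ t * m = 1)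
instance (n : Int) (t : Int) (m : Int) (p : Int) : Decidable (Pre_solution n t m p) := by
  unfold Pre_solution; infer_instance

def pvWitness_solution : Int × Int × Int × Int := (2, 4, 3, 2)

def Spec_solution (n : Int) (t : Int) (m : Int) (p : Int) (out : String) : Prop := out = solution_alt n t m p
instance (n : Int) (t : Int) (m : Int) (p : Int) (out : String) : Decidable (Spec_solution n t m p out) := by
  unfold Spec_solution; infer_instance

-- ===== CLAIM (what is proved, stated in full; the proofs are below) =====
def Claim_equal_solution : Prop := ∀ (n : Int) (t : Int) (m : Int) (p : Int),
  Dom_solution n t m p → Pre_solution n t m p → Spec_solution n t m p (solution n t m p)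

-- ===== LEMMAS AND PROOFS =====

-- the selection both programs compute: the characters whose stream position pos has pos % m + 1 == p
def pvSel (m p : Int) : List Char → Int → List Char
  | [], _ => []
  | c :: cs, pos => (if PySem.Int.mod pos m + 1 = p then [c] else []) ++ pvSel m p cs (pos + 1)

-- the two digit renderings agree on every Int
theorem pvDigit_eq (d : Int) : pvDigitA d = pvRender d := by
  by_cases h : 10 ≤ d ∧ d ≤ 15
  · have : d = 10 ∨ d = 11 ∨ d = 12 ∨ d = 13 ∨ d = 14 ∨ d = 15 := by omega
    rcases this with h | h | h | h | h | h <;> subst h <;> decide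
  · have e : PySem.Dict.get? pvDicR d = none := by
      simp only [pvDicR, PySem.Dict.get?, List.find?]
      have h10 : ((10 : Int) == d) = false := by simp; omega
      have h11 : ((11 : Int) == d) = false := by simp; omega
      have h12 : ((12 : Int) == d) = false := by simp; omega
      have h13 : ((13 : Int) == d) = false := by simp; omega
      have h14 : ((14 : Int) == d) = false := by simp; omega
      have h15 : ((15 : Int) == d) = false := by simp; omega
      simp [h10, h11, h12, h13, h14, h15]
    simp [pvDigitA, e, pvRender, h]

-- accumulator law for A's conversion loop
theorem pvRadixLoopA_acc (n : Int) (fuel : Nat) (num : Int) (temp : List (List Char)) :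
    pvRadixLoopA n fuel num temp =
      (temp ++ (pvRadixLoopA n fuel num []).1, (pvRadixLoopA n fuel num []).2) := by
  induction fuel generalizing num temp with
  | zero => simp [pvRadixLoopA]
  | succ f ih =>
    simp only [pvRadixLoopA]
    split
    · rw [ih, ih (temp := [] ++ [pvDigitA (PySem.Int.mod num n)])]
      simp
    · simp

-- B's recursive conversion equals A's loop-and-reverse conversion (same fuel on both sides)
theorem pvRecCore (n : Int) (hn : 2 ≤ n) :
    ∀ (k : Nat) (num : Int), 0 ≤ num → num.toNat ≤ k →
      pvRec n (k + 1) num =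
        (((pvRadixLoopA n (k + 1) num []).1 ++ [pvDigitA (pvRadixLoopA n (k + 1) num []).2]).reverse).flatten := by
  intro k
  induction k with
  | zero =>
    intro num h0 hk
    have : num = 0 := by omega
    subst this
    have h1 : (0 : Int) < n := by omega
    simp [pvRec, pvRadixLoopA, show ¬ n ≤ (0 : Int) by omega, show (0 : Int) < n from h1,
      pvDigit_eq]
  | succ k ih =>
    intro num h0 hk
    by_cases hlt : num < n
    · simp [pvRec, pvRadixLoopA, hlt, not_le.2 hlt, pvDigit_eq]
    · have hpos : (0:Int) < n := by omega
      have h1' : 1 ≤ PySem.Int.floordiv num n :=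
        (PySem.Int.le_floordiv_iff_mul_le hpos).2 (by omega)
      have hlt' : PySem.Int.floordiv num n < num :=
        (PySem.Int.floordiv_lt_iff_lt_mul hpos).2 (by nlinarith)
      have h2' : (PySem.Int.floordiv num n).toNat ≤ k := by omega
      have hA : pvRadixLoopA n (k + 1 + 1) num [] =
          ([pvDigitA (PySem.Int.mod num n)] ++ (pvRadixLoopA n (k + 1) (PySem.Int.floordiv num n) []).1,
           (pvRadixLoopA n (k + 1) (PySem.Int.floordiv num n) []).2) := by
        have : pvRadixLoopA n (k + 1 + 1) num [] =
            pvRadixLoopA n (k + 1) (PySem.Int.floordiv num n) ([] ++ [pvDigitA (PySem.Int.mod num n)]) := by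
          simp [pvRadixLoopA, not_lt.1 hlt]
        rw [this, pvRadixLoopA_acc]
        simp
      have hB : pvRec n (k + 1 + 1) num =
          pvRec n (k + 1) (PySem.Int.floordiv num n) ++ pvRender (PySem.Int.mod num n) := by
        simp [pvRec, hlt]
      rw [hB, hA, ih (PySem.Int.floordiv num n) (by omega) h2']
      simp [pvDigit_eq]

theorem pvRec_eq (n num : Int) (hn : 2 ≤ n) (h0 : 0 ≤ num) :
    pvRec n (num.toNat + 1) num = pvRadixA num n :=
  pvRecCore n hn num.toNat num h0 le_rfl

-- the inner character loop appends exactly the selection and advances pos by the length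
theorem pvInner_eq (m p : Int) :
    ∀ (cs res : List Char) (pos : Int),
      pvInner m p cs res pos = (res ++ pvSel m p cs pos, pos + cs.length) := by
  intro cs
  induction cs with
  | nil => intro res pos; simp [pvInner, pvSel]
  | cons c cs ih =>
    intro res pos
    have step : pvInner m p (c :: cs) res pos
        = pvInner m p cs (if PySem.Int.mod pos m = p - 1 then res ++ [c] else res) (pos + 1) := by
      simp [pvInner]
    rw [step, ih]
    by_cases h : PySem.Int.mod pos m = p - 1
    · have h' : PySem.Int.mod pos m + 1 = p := by omega
      simp only [pvSel, if_pos h, if_pos h', Prod.mk.injEq, List.append_assoc, List.length_cons]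
      exact ⟨by trivial, by push_cast; ring⟩
    · have h' : ¬ PySem.Int.mod pos m + 1 = p := by omega
      simp only [pvSel, if_neg h, if_neg h', Prod.mk.injEq, List.nil_append, List.length_cons]
      exact ⟨by trivial, by push_cast; ring⟩

theorem pvSel_append (m p : Int) :
    ∀ (cs1 cs2 : List Char) (pos : Int),
      pvSel m p (cs1 ++ cs2) pos = pvSel m p cs1 pos ++ pvSel m p cs2 (pos + cs1.length) := by
  intro cs1
  induction cs1 with
  | nil => intro cs2 pos; simp [pvSel]
  | cons c cs ih =>
    intro cs2 pos
    simp only [List.cons_append, pvSel, ih, List.append_assoc, List.length_cons]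
    congr 2
    push_cast
    ring_nf

-- B's outer loop with break computes, up to the final [:t] slice, the full selection
theorem pvLoopB_slice (n t m p : Int) :
    ∀ (L : List Int) (res : List Char) (pos : Int),
      PySem.List.slice (pvLoopB n t m p L res pos) none (some t)
        = PySem.List.slice
            (res ++ pvSel m p ((L.map (fun i => pvRec n (i.toNat + 1) i)).flatten) pos)
            none (some t) := by
  intro L
  induction L with
  | nil => intro res pos; simp [pvLoopB, pvSel]
  | cons i rest ih =>
    intro res pos
    simp only [pvLoopB]
    split
    · rename_i h
      have ht : (0 : Int) ≤ t := by rw [← h]; exact Int.natCast_nonneg _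
      rw [PySem.List.slice_to _ ht, PySem.List.slice_to _ ht]
      have hlen : t.toNat = res.length := by omega
      rw [hlen, List.take_left' rfl, List.take_length]
    · rw [pvInner_eq, ih]
      simp only [List.map_cons, List.flatten_cons, pvSel_append, List.append_assoc]

-- A's index-filter pass over a character list is the same selection
theorem pvSel_index (m p : Int) :
    ∀ (cs : List Char) (pos : Nat),
      ((List.range cs.length).filter
          (fun j => decide (PySem.Int.mod (((pos + j : Nat) : Int)) m + 1 = p))).map
        (fun j => PySem.List.pyGetD cs ((j : Nat) : Int) ' ')
      = pvSel m p cs (pos : Int) := by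
  intro cs
  induction cs with
  | nil => intro pos; simp [pvSel]
  | cons c cs ih =>
    intro pos
    rw [List.length_cons, List.range_succ_eq_map, List.filter_cons]
    have hsel : pvSel m p (c :: cs) ((pos : Nat) : Int)
        = (if PySem.Int.mod ((pos : Nat) : Int) m + 1 = p then [c] else [])
            ++ pvSel m p cs (((pos + 1 : Nat) : Int)) := by
      have e : ((pos : Nat) : Int) + 1 = (((pos + 1 : Nat)) : Int) := by push_cast; ring
      simp only [pvSel, e]
    have htail :
        ((List.range cs.length).filter
            ((fun j => decide (PySem.Int.mod (((pos + j : Nat)) : Int) m + 1 = p)) ∘ Nat.succ)).map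
          ((fun j => PySem.List.pyGetD (c :: cs) ((j : Nat) : Int) ' ') ∘ Nat.succ)
        = pvSel m p cs (((pos + 1 : Nat) : Int)) := by
      rw [← ih (pos + 1)]
      have e1 : ((fun j => decide (PySem.Int.mod (((pos + j : Nat)) : Int) m + 1 = p)) ∘ Nat.succ)
          = (fun j => decide (PySem.Int.mod ((((pos + 1) + j : Nat)) : Int) m + 1 = p)) := by
        funext j
        simp only [Function.comp_apply]
        have e : pos + Nat.succ j = (pos + 1) + j := by omega
        rw [e]
      rw [e1]
      apply List.map_congr_left
      intro j _
      simp only [Function.comp_apply, PySem.List.pyGetD_natCast]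
      simp [List.getD]
    rw [hsel]
    by_cases h0 : PySem.Int.mod ((pos : Nat) : Int) m + 1 = p
    · rw [if_pos (by simpa using h0), if_pos h0, List.map_cons, List.filter_map, List.map_map, htail]
      simp
    · rw [if_neg (by simpa using h0), if_neg h0, List.filter_map, List.map_map, htail]
      simp

-- ===== VERDICT (by name: the statement is the Claim_ definition above) =====
theorem solution_spec : Claim_equal_solution := by
  intro n t m p _ hpre
  unfold Spec_solution solution solution_alt
  have hdig : ∀ i ∈ PySem.List.pyRange 0 (t * m), pvRadixA i n = pvRec n (i.toNat + 1) i := by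
    intro i hi
    obtain ⟨h0i, hilt⟩ := PySem.List.mem_pyRange_one.1 hi
    rcases hpre with hn | htm | ⟨hn1, htm1⟩
    · exact (pvRec_eq n i hn h0i).symm
    · omega
    · have : i = 0 := by omega
      subst this; subst hn1; decide
  have horder : (PySem.List.pyRange 0 (t * m)).foldl (fun acc i => acc ++ pvRadixA i n) ([] : List Char)
      = ((PySem.List.pyRange 0 (t * m)).map (fun i => pvRec n (i.toNat + 1) i)).flatten := by
    rw [PySem.List.foldl_append_eq_flatMap, List.flatMap_def, List.nil_append]
    exact congrArg List.flatten (List.map_congr_left hdig)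
  rw [horder]
  dsimp only
  set ord := ((PySem.List.pyRange 0 (t * m)).map (fun i => pvRec n (i.toNat + 1) i)).flatten with hord
  -- A's second pass is the selection pvSel ord 0
  rw [PySem.List.foldl_append_ite (p := fun i => PySem.Int.mod i m + 1 = p)
      (f := fun i => PySem.List.pyGetD ord i ' ')]
  rw [List.nil_append, PySem.List.pyRange_zero_natCast, List.filter_map, List.map_map]
  simp only [Function.comp_def]
  have hA : ((List.range ord.length).filter
        (fun j => decide (PySem.Int.mod (((0 + j : Nat) : Int)) m + 1 = p))).map
      (fun j => PySem.List.pyGetD ord ((j : Nat) : Int) ' ') = pvSel m p ord ((0 : Nat) : Int) :=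
    pvSel_index m p ord 0
  simp only [Nat.zero_add, Nat.cast_zero] at hA
  rw [hA, pvLoopB_slice n t m p (PySem.List.pyRange 0 (t * m)) [] 0, List.nil_append, ← hord]
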